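-- pv_equiv track=rewrite | github.com/musabatas/neo-multi-tenant-auth | neo-commons/src/neo_commons/features/users/services/user_permission_service.py | _get_highest_role_level
-- ===== SOURCE A (Python) =====
-- from typing import Dict, Any, List, Optional
--
-- def _get_highest_role_level(roles: List[Dict[str, Any]]) -> Optional[str]:
--     """Get the highest role level from user's roles."""
--     if not roles:
--         return None
--
--     # Role level hierarchy (higher number = higher privilege)
--     level_priority = {
--         'platform': 5,
--         'admin': 4,
--         'manager': 3,
--         'member': 2,
--         'guest': 1
--     }
--
--     highest_priority = 0
--     highest_level = None
--
--     for role in roles: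
--         role_level = role.get('role_level', 'member')
--         priority = level_priority.get(role_level, 0)
--         if priority > highest_priority:
--             highest_priority = priority
--             highest_level = role_level
--
--     return highest_level
-- ===== SOURCE B (Python) =====
-- def _get_highest_role_level(roles):
--     """Get the highest role level from user's roles."""
--     present = {role.get('role_level', 'member') for role in roles}
--     for level in ('platform', 'admin', 'manager', 'member', 'guest'):
--         if level in present:
--             return level
--     return None
-- ===== Notes on version B (the rewrite author's own statement) =====
-- stated objective: idiomatic
-- what changed: Instead of scanning roles while tracking a running maximum priority and its level, B collects the present role levels into a set and walks the fixed hierarchy from highest to lowest, returning the first level present.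
import Mathlib
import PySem

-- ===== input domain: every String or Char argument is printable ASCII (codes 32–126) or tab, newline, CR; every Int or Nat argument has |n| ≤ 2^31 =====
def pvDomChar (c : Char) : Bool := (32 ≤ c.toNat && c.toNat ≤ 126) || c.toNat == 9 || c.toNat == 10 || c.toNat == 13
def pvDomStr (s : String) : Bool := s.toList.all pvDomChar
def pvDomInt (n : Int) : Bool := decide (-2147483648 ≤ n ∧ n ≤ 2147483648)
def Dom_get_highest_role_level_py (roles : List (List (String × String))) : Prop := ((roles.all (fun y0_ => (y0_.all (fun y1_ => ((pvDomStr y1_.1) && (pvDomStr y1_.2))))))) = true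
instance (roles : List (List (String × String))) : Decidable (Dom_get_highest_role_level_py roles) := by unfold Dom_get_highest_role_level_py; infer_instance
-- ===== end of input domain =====

-- B replaces A's running-maximum scan over roles by collecting the present role levels
-- into a set and walking the fixed hierarchy from highest to lowest (objective: idiomatic).

-- ===== PORT A =====
def get_highest_role_level_py (roles : List (List (String × String))) : Option String :=
  if roles = [] then none
  else
    let level_priority : PySem.Dict String Int :=
      PySem.Dict.ofList [("platform", 5), ("admin", 4), ("manager", 3), ("member", 2), ("guest", 1)]
    (roles.foldl (fun (acc : Int × Option String) role =>
        let role_level := (PySem.Dict.mk role).getD "role_level" "member"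
        let priority := level_priority.getD role_level 0
        if priority > acc.1 then (priority, some role_level) else acc)
      (0, none)).2

-- ===== PORT B =====
def get_highest_role_level_py_alt (roles : List (List (String × String))) : Option String :=
  let present : PySem.Set String :=
    roles.foldl (fun s role => PySem.Set.add s ((PySem.Dict.mk role).getD "role_level" "member")) PySem.Set.empty
  ["platform", "admin", "manager", "member", "guest"].find? (fun level => PySem.Set.contains present level)

-- ===== PRECONDITION & SPEC =====
def Spec_get_highest_role_level_py (roles : List (List (String × String))) (out : Option String) : Prop := out = get_highest_role_level_py_alt roles
instance (roles : List (List (String × String))) (out : Option String) : Decidable (Spec_get_highest_role_level_py roles out) := by unfold Spec_get_highest_role_level_py; infer_instance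

-- ===== CLAIM (what is proved, stated in full; the proofs are below) =====
def Claim_equal_get_highest_role_level_py : Prop := ∀ (roles : List (List (String × String))), Dom_get_highest_role_level_py roles → Spec_get_highest_role_level_py roles (get_highest_role_level_py roles)

-- ===== LEMMAS AND PROOFS =====

-- the role level of one role dict
def pvLevel (role : List (String × String)) : String :=
  (PySem.Dict.mk role).getD "role_level" "member"

-- the priority A's dict assigns to a level string
def pvRank (x : String) : Int :=
  if x = "platform" then 5 else if x = "admin" then 4 else if x = "manager" then 3
  else if x = "member" then 2 else if x = "guest" then 1 else 0

-- the level name for a priority value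
def pvInvRank (p : Int) : Option String :=
  if p = 5 then some "platform" else if p = 4 then some "admin" else if p = 3 then some "manager"
  else if p = 2 then some "member" else if p = 1 then some "guest" else none

-- the maximum priority among a list of level strings
def pvM (ls : List String) : Int := ls.foldl (fun a x => max a (pvRank x)) 0

lemma pvRank_bounds (x : String) : 0 ≤ pvRank x ∧ pvRank x ≤ 5 := by
  unfold pvRank; split_ifs <;> norm_num

lemma pvPriority_eq (x : String) :
    (PySem.Dict.ofList [("platform", (5 : Int)), ("admin", 4), ("manager", 3), ("member", 2), ("guest", 1)]).getD x 0 = pvRank x := by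
  rw [show (PySem.Dict.ofList [("platform", (5 : Int)), ("admin", 4), ("manager", 3), ("member", 2), ("guest", 1)]) = PySem.Dict.mk [("platform", (5 : Int)), ("admin", 4), ("manager", 3), ("member", 2), ("guest", 1)] from rfl]
  simp only [PySem.Dict.getD_eq_get?_getD, PySem.Dict.get?_mk_cons]
  unfold pvRank
  split_ifs <;> simp_all [PySem.Dict.get?]

lemma pvInvRank_rank (x : String) (h : 1 ≤ pvRank x) : pvInvRank (pvRank x) = some x := by
  unfold pvRank at h ⊢
  split_ifs at h ⊢ with h1 h2 h3 h4 h5 <;> simp_all [pvInvRank]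

lemma pvFoldMax_ge (ls : List String) : ∀ p : Int, p ≤ ls.foldl (fun a x => max a (pvRank x)) p := by
  induction ls with
  | nil => intro p; simp
  | cons a t ih =>
    intro p
    simpa using le_trans (le_max_left p (pvRank a)) (ih (max p (pvRank a)))

lemma pvFoldMax_mem_le (ls : List String) : ∀ p : Int, ∀ x ∈ ls, pvRank x ≤ ls.foldl (fun a x => max a (pvRank x)) p := by
  induction ls with
  | nil => intro p x hx; simp at hx
  | cons a t ih =>
    intro p x hx
    rcases List.mem_cons.mp hx with hx | hx
    · simpa [hx] using le_trans (le_max_right p (pvRank a)) (pvFoldMax_ge t (max p (pvRank a)))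
    · simpa using ih (max p (pvRank a)) x hx

lemma pvFoldMax_cases (ls : List String) : ∀ p : Int,
    ls.foldl (fun a x => max a (pvRank x)) p = p ∨ ∃ x ∈ ls, ls.foldl (fun a x => max a (pvRank x)) p = pvRank x := by
  induction ls with
  | nil => intro p; left; simp
  | cons a t ih =>
    intro p
    rcases ih (max p (pvRank a)) with h | ⟨x, hx, h⟩
    · rcases le_total (pvRank a) p with hle | hle
      · left; simpa [max_eq_left hle] using h
      · right; exact ⟨a, List.mem_cons_self, by simpa [max_eq_right hle] using h⟩
    · right; exact ⟨x, List.mem_cons_of_mem _ hx, by simpa using h⟩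

lemma pvM_nonneg (ls : List String) : 0 ≤ pvM ls := pvFoldMax_ge ls 0

lemma pvM_le5 (ls : List String) : pvM ls ≤ 5 := by
  rcases pvFoldMax_cases ls 0 with h | ⟨x, _, h⟩
  · unfold pvM; omega
  · unfold pvM; rw [h]; exact (pvRank_bounds x).2

lemma pvM_eq_rank (ls : List String) (k : Int) (hk : 1 ≤ k) (h : pvM ls = k) :
    ∃ x ∈ ls, pvRank x = k := by
  rcases pvFoldMax_cases ls 0 with h0 | ⟨x, hx, hr⟩
  · unfold pvM at h; omega
  · exact ⟨x, hx, by unfold pvM at h; rw [h] at hr; omega⟩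

-- A's loop computes the maximum priority together with its canonical level name
lemma pvFoldA (ls : List String) : ∀ p : Int, 0 ≤ p →
    ls.foldl (fun (acc : Int × Option String) x => if pvRank x > acc.1 then (pvRank x, some x) else acc) (p, pvInvRank p)
      = (ls.foldl (fun a x => max a (pvRank x)) p, pvInvRank (ls.foldl (fun a x => max a (pvRank x)) p)) := by
  induction ls with
  | nil => intro p hp; simp
  | cons a t ih =>
    intro p hp
    simp only [List.foldl_cons]
    by_cases h : pvRank a > p
    · have hmax : max p (pvRank a) = pvRank a := by omega
      have hin : pvInvRank (pvRank a) = some a := pvInvRank_rank a (by omega)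
      rw [if_pos h, hmax, ← hin, ih (pvRank a) (by omega)]
    · have hmax : max p (pvRank a) = p := by omega
      rw [if_neg h, hmax, ih p hp]

lemma pvA_eq (roles : List (List (String × String))) :
    get_highest_role_level_py roles = pvInvRank (pvM (roles.map pvLevel)) := by
  unfold get_highest_role_level_py
  by_cases hnil : roles = []
  · subst hnil; simp [pvM, pvInvRank]
  · rw [if_neg hnil]
    simp only [pvPriority_eq]
    have h0 : (none : Option String) = pvInvRank 0 := by simp [pvInvRank]
    simp only [← pvLevel.eq_def]
    rw [h0, ← List.foldl_map (f := pvLevel)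
        (g := fun (acc : Int × Option String) x => if pvRank x > acc.1 then (pvRank x, some x) else acc),
      pvFoldA (roles.map pvLevel) 0 le_rfl]
    rfl

lemma pvPresent_eq (roles : List (List (String × String))) :
    roles.foldl (fun s role => PySem.Set.add s ((PySem.Dict.mk role).getD "role_level" "member")) PySem.Set.empty
      = PySem.Set.ofList (roles.map pvLevel) := by
  rw [PySem.Set.ofList_eq_foldl, List.foldl_map]
  rfl

lemma pvContains_ofList (ls : List String) (y : String) :
    PySem.Set.contains (PySem.Set.ofList ls) y = decide (y ∈ ls) := by
  by_cases h : y ∈ ls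
  · simp [PySem.Set.contains, (PySem.Set.mem_ofList ls y).mpr h, h]
  · simp [PySem.Set.contains, h]

lemma pvB_eq (roles : List (List (String × String))) :
    get_highest_role_level_py_alt roles = pvInvRank (pvM (roles.map pvLevel)) := by
  unfold get_highest_role_level_py_alt
  rw [pvPresent_eq]
  set ls := roles.map pvLevel with hls
  have hrank_p : pvRank "platform" = 5 := by decide
  have hrank_a : pvRank "admin" = 4 := by decide
  have hrank_m : pvRank "manager" = 3 := by decide
  have hrank_b : pvRank "member" = 2 := by decide
  have hrank_g : pvRank "guest" = 1 := by decide
  have hub := pvM_le5 ls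
  have hlb := pvM_nonneg ls
  simp only [List.find?, pvContains_ofList]
  by_cases h5 : "platform" ∈ ls
  · have hM : pvM ls = 5 := le_antisymm hub (by simpa [hrank_p] using pvFoldMax_mem_le ls 0 _ h5)
    simp [h5, hM, pvInvRank]
  · have hM5 : pvM ls ≠ 5 := fun hM => by
      obtain ⟨x, hx, hr⟩ := pvM_eq_rank ls 5 (by norm_num) hM
      have := pvInvRank_rank x (by omega)
      rw [hr] at this
      simp only [pvInvRank] at this; norm_num at this
      exact h5 (this ▸ hx)
    by_cases h4 : "admin" ∈ ls
    · have hM : pvM ls = 4 := le_antisymm (by omega) (by simpa [hrank_a] using pvFoldMax_mem_le ls 0 _ h4)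
      simp [h5, h4, hM, pvInvRank]
    · have hM4 : pvM ls ≠ 4 := fun hM => by
        obtain ⟨x, hx, hr⟩ := pvM_eq_rank ls 4 (by norm_num) hM
        have := pvInvRank_rank x (by omega)
        rw [hr] at this
        simp only [pvInvRank] at this; norm_num at this
        exact h4 (this ▸ hx)
      by_cases h3 : "manager" ∈ ls
      · have hM : pvM ls = 3 := le_antisymm (by omega) (by simpa [hrank_m] using pvFoldMax_mem_le ls 0 _ h3)
        simp [h5, h4, h3, hM, pvInvRank]
      · have hM3 : pvM ls ≠ 3 := fun hM => by
          obtain ⟨x, hx, hr⟩ := pvM_eq_rank ls 3 (by norm_num) hM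
          have := pvInvRank_rank x (by omega)
          rw [hr] at this
          simp only [pvInvRank] at this; norm_num at this
          exact h3 (this ▸ hx)
        by_cases h2 : "member" ∈ ls
        · have hM : pvM ls = 2 := le_antisymm (by omega) (by simpa [hrank_b] using pvFoldMax_mem_le ls 0 _ h2)
          simp [h5, h4, h3, h2, hM, pvInvRank]
        · have hM2 : pvM ls ≠ 2 := fun hM => by
            obtain ⟨x, hx, hr⟩ := pvM_eq_rank ls 2 (by norm_num) hM
            have := pvInvRank_rank x (by omega)
            rw [hr] at this
            simp only [pvInvRank] at this; norm_num at this
            exact h2 (this ▸ hx)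
          by_cases h1 : "guest" ∈ ls
          · have hM : pvM ls = 1 := le_antisymm (by omega) (by simpa [hrank_g] using pvFoldMax_mem_le ls 0 _ h1)
            simp [h5, h4, h3, h2, h1, hM, pvInvRank]
          · have hM1 : pvM ls ≠ 1 := fun hM => by
              obtain ⟨x, hx, hr⟩ := pvM_eq_rank ls 1 (by norm_num) hM
              have := pvInvRank_rank x (by omega)
              rw [hr] at this
              simp only [pvInvRank] at this; norm_num at this
              exact h1 (this ▸ hx)
            have hM : pvM ls = 0 := by omega
            simp [h5, h4, h3, h2, h1, hM, pvInvRank]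

-- ===== VERDICT (by name: the statement is the Claim_ definition above) =====
theorem get_highest_role_level_py_spec : Claim_equal_get_highest_role_level_py := by
  intro roles _
  unfold Spec_get_highest_role_level_py
  rw [pvA_eq, pvB_eq]
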